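-- pv_equiv track=rewrite | github.com/ThangQT2606/PYTHON | PY01011.py | solve
-- ===== SOURCE A (Python) =====
-- def solve(n):
--     res , m = 0, n
--     dem = 0
--     while n > 0:
--         res = res * 10 + n%10
--         dem += 1
--         n //= 10
--     if res != m:
--         return False
--     if res == m and dem%2 == 0:
--         return True
-- ===== SOURCE B (Python) =====
-- def solve(n):
--     if n < 0:
--         return False
--     s = str(n)
--     t = s
--     while len(t) > 1:
--         if t[0] != t[-1]:
--             return False
--         t = t[1:-1]
--     if len(s) % 2 == 0:
--         return True
-- ===== Notes on version B (the rewrite author's own statement) =====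
-- stated objective: idiomatic
-- what changed: A reconstructs the reversed number by arithmetic digit accumulation and compares integers; B checks the decimal string directly, peeling equal end characters off both sides, so no multiply/accumulate pass exists.
-- intended difference: On n = 0 A returns True because its while loop never runs and counts zero digits (an even count), while B sees the one-character string '0', a palindrome of odd length, and returns None, which is the intended answer for a one-digit number under the odd-length rule. — e.g. on solve(0): A returns some true, B returns none
import Mathlib
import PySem

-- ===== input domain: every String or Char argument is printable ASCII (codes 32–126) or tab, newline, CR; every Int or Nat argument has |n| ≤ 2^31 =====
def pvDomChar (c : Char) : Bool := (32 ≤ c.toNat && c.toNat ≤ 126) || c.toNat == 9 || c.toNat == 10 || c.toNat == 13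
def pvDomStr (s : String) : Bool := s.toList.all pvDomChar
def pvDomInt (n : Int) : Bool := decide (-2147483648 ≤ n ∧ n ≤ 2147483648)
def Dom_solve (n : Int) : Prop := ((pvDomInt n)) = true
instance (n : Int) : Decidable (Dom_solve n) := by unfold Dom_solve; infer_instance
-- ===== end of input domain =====

-- B replaces A's arithmetic digit-reversal pass by a direct check on the decimal string,
-- peeling equal characters off both ends (idiomatic; not claimed faster).

-- ===== PORT A =====
-- while n > 0: res = res*10 + n%10; dem += 1; n //= 10
def solveLoopA (n res dem : Int) : Int × Int :=
  if h : 0 < n then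
    solveLoopA (PySem.Int.floordiv n 10) (res * 10 + PySem.Int.mod n 10) (dem + 1)
  else (res, dem)
termination_by n.toNat
decreasing_by
  rw [PySem.Int.floordiv_eq_ediv_of_pos (by norm_num)]
  omega

def solve (n : Int) : Option Bool :=
  let m := n
  let p := solveLoopA n 0 0
  if p.1 ≠ m then some false
  else if p.1 = m ∧ PySem.Int.mod p.2 2 = 0 then some true
  else none

-- ===== PORT B =====
-- while len(t) > 1: if t[0] != t[-1]: return False; t = t[1:-1]
def palChars (t : List Char) : Bool :=
  if 1 < t.length then
    if PySem.List.pyGetD t 0 ' ' ≠ PySem.List.pyGetD t (-1) ' ' then false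
    else palChars (PySem.List.slice t (some 1) (some (-1)))
  else true
termination_by t.length
decreasing_by
  rw [PySem.List.length_slice]
  simp
  omega

def solve_alt (n : Int) : Option Bool :=
  if n < 0 then some false
  else
    let s := PySem.Int.toChars n
    if palChars s = false then some false
    else if s.length % 2 = 0 then some true
    else none

-- ===== PRECONDITION & SPEC =====
-- On n = 0 A returns True (its loop runs zero times, so it counts zero digits, an even count);
-- B sees the one-character string "0", a palindrome of odd length, and returns None, the
-- intended answer for a one-digit number under the odd-length rule.
def D_solve (n : Int) : Prop := n = 0
instance (n : Int) : Decidable (D_solve n) := by unfold D_solve; infer_instance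

def Spec_solve (n : Int) (out : Option Bool) : Prop := ¬ D_solve n → out = solve_alt n
instance (n : Int) (out : Option Bool) : Decidable (Spec_solve n out) := by unfold Spec_solve; infer_instance

def pvDiffWitness_solve : Int := 0
def pvDiffWitnessOut_solve : (Option Bool) × (Option Bool) := (some true, none)

-- ===== CLAIM (what is proved, stated in full; the proofs are below) =====
def Claim_unchanged_solve : Prop := ∀ (n : Int), Dom_solve n → Spec_solve n (solve n)
def Claim_changed_solve : Prop := Dom_solve (pvDiffWitness_solve) ∧ D_solve (pvDiffWitness_solve) ∧ solve (pvDiffWitness_solve) = pvDiffWitnessOut_solve.1 ∧ solve_alt (pvDiffWitness_solve) = pvDiffWitnessOut_solve.2 ∧ pvDiffWitnessOut_solve.1 ≠ pvDiffWitnessOut_solve.2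
def Claim_exact_solve : Prop := ∀ (n : Int), Dom_solve n → D_solve n → solve n ≠ solve_alt n

-- ===== LEMMAS AND PROOFS =====

-- A's loop computes (the digit-reversed number, the number of digits).
theorem solveLoopA_eq (k : Nat) (res dem : Int) :
    solveLoopA (k : Int) res dem =
      (res * 10 ^ (Nat.digits 10 k).length + (Nat.ofDigits 10 (Nat.digits 10 k).reverse : Nat),
       dem + (Nat.digits 10 k).length) := by
  induction k using Nat.strong_induction_on generalizing res dem with
  | _ k ih =>
    rcases Nat.eq_zero_or_pos k with hk | hk
    · subst hk
      rw [solveLoopA]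
      simp
    · rw [solveLoopA]
      rw [dif_pos (by exact_mod_cast hk)]
      have hfd : PySem.Int.floordiv ((k : Nat) : Int) 10 = ((k / 10 : Nat) : Int) := by
        exact_mod_cast PySem.Int.floordiv_natCast k 10
      have hmd : PySem.Int.mod ((k : Nat) : Int) 10 = ((k % 10 : Nat) : Int) := by
        exact_mod_cast PySem.Int.mod_natCast k 10
      rw [hfd, hmd]
      rw [ih (k / 10) (Nat.div_lt_self hk (by norm_num)) _ _]
      rw [Nat.digits_def' (by norm_num : 1 < 10) hk]
      simp only [List.reverse_cons, Nat.ofDigits_append, List.length_reverse, List.length_cons,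
        Nat.ofDigits_cons, Nat.ofDigits_nil, Prod.mk.injEq]
      constructor
      · push_cast
        ring
      · push_cast
        ring

theorem slice_one_neg_one (xs : List Char) :
    PySem.List.slice xs (some 1) (some (-1)) = xs.tail.dropLast := by
  simp [PySem.List.slice, PySem.List.clampIdx]
  rcases xs with _ | ⟨a, t⟩
  · simp
  · simp
    rw [List.dropLast_eq_take]

-- B's peel-both-ends loop decides "the string is a palindrome".
theorem palChars_iff_aux : ∀ (n : Nat) (l : List Char), l.length ≤ n →
    (palChars l = true ↔ l.reverse = l) := by
  intro n
  induction n with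
  | zero =>
    intro l h
    have : l = [] := by cases l <;> simp_all
    subst this
    rw [palChars]
    simp
  | succ n ih =>
    intro l hl
    by_cases h1 : 1 < l.length
    · obtain ⟨x, t, rfl⟩ : ∃ x t, l = x :: t := by
        cases l with
        | nil => simp at h1
        | cons a b => exact ⟨a, b, rfl⟩
      have ht : t ≠ [] := by intro h; subst h; simp at h1
      obtain ⟨mid, y, rfl⟩ : ∃ mid y, t = mid ++ [y] :=
        ⟨t.dropLast, t.getLast ht, (List.dropLast_append_getLast ht).symm⟩
      rw [palChars, if_pos h1]
      have hx : PySem.List.pyGetD (x :: (mid ++ [y])) 0 ' ' = x :=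
        PySem.List.pyGetD_zero_cons x (mid ++ [y]) ' '
      have hy : PySem.List.pyGetD (x :: (mid ++ [y])) (-1) ' ' = y := by
        have h2 := PySem.List.pyGetD_neg_one_append_singleton (xs := x :: mid) (x := y) (d := ' ')
        simpa using h2
      have hs : PySem.List.slice (x :: (mid ++ [y])) (some 1) (some (-1)) = mid := by
        rw [slice_one_neg_one]
        simp
      rw [hx, hy, hs]
      have hmidlen : mid.length ≤ n := by simp at hl; omega
      by_cases hxy : x = y
      · subst hxy
        rw [if_neg (by simp)]
        rw [ih mid hmidlen]
        simp [List.reverse_cons, List.reverse_append]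
      · rw [if_pos hxy]
        simp only [Bool.false_eq_true, false_iff]
        intro h
        simp [List.reverse_cons, List.reverse_append] at h
        exact hxy h.1.symm
    · rw [palChars, if_neg h1]
      simp only [true_iff]
      cases l with
      | nil => simp
      | cons a t =>
        cases t with
        | nil => simp
        | cons b u => exfalso; simp at h1

theorem digitChar_inj (a b : Nat) (ha : a < 16) (hb : b < 16)
    (h : Nat.digitChar a = Nat.digitChar b) : a = b := by
  interval_cases a <;> interval_cases b <;> simp_all [Nat.digitChar]

theorem mapDigitChar_inj : ∀ (l1 l2 : List Nat), (∀ d ∈ l1, d < 10) → (∀ d ∈ l2, d < 10) →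
    l1.map Nat.digitChar = l2.map Nat.digitChar → l1 = l2 := by
  intro l1
  induction l1 with
  | nil => intro l2 _ _ h; cases l2 <;> simp_all
  | cons d t ih =>
    intro l2 h1 h2 h
    cases l2 with
    | nil => simp_all
    | cons d2 t2 =>
      simp only [List.map_cons, List.cons.injEq] at h
      have hd : d = d2 :=
        digitChar_inj d d2 (by have := h1 d (by simp); omega) (by have := h2 d2 (by simp); omega) h.1
      have ht : t = t2 := ih t2 (fun x hx => h1 x (by simp [hx])) (fun x hx => h2 x (by simp [hx])) h.2
      simp [hd, ht]

-- base-10 representations of equal length are unique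
theorem ofDigits_inj10 : ∀ (l1 l2 : List Nat), l1.length = l2.length →
    (∀ d ∈ l1, d < 10) → (∀ d ∈ l2, d < 10) →
    Nat.ofDigits 10 l1 = Nat.ofDigits 10 l2 → l1 = l2 := by
  intro l1
  induction l1 with
  | nil => intro l2 hl _ _ _; cases l2 <;> simp_all
  | cons d t ih =>
    intro l2 hl h1 h2 h
    cases l2 with
    | nil => simp_all
    | cons d2 t2 =>
      rw [Nat.ofDigits_cons, Nat.ofDigits_cons] at h
      have hd1 : d < 10 := h1 d (by simp)
      have hd2 : d2 < 10 := h2 d2 (by simp)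
      have hd : d = d2 ∧ Nat.ofDigits 10 t = Nat.ofDigits 10 t2 := by omega
      have ht : t = t2 :=
        ih t2 (by simpa using hl) (fun x hx => h1 x (by simp [hx])) (fun x hx => h2 x (by simp [hx])) hd.2
      simp [hd.1, ht]

-- core's toDigitsCore produces the decimal digits, most significant first
theorem toDigitsCore_eq : ∀ (f n : Nat) (ds : List Char), n < f → 0 < n →
    Nat.toDigitsCore 10 f n ds = ((Nat.digits 10 n).map Nat.digitChar).reverse ++ ds := by
  intro f
  induction f with
  | zero => intro n ds h _; omega
  | succ f ih =>
    intro n ds h hn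
    rw [Nat.toDigitsCore]
    rw [Nat.digits_def' (by norm_num : 1 < 10) hn]
    by_cases h0 : n / 10 = 0
    · rw [if_pos h0, h0]
      simp
    · rw [if_neg h0]
      rw [ih (n / 10) ((n % 10).digitChar :: ds) (by omega) (by omega)]
      simp

theorem solve_eq_of_pos (k : Nat) (hk : 0 < k) : solve (k : Int) = solve_alt (k : Int) := by
  have hds10 : ∀ d ∈ Nat.digits 10 k, d < 10 := fun d hd => Nat.digits_lt_base (by norm_num) hd
  have hs : PySem.Int.toChars ((k : Nat) : Int) = ((Nat.digits 10 k).map Nat.digitChar).reverse := by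
    have h1 : ¬ ((k : Nat) : Int) < 0 := by omega
    simp only [PySem.Int.toChars, if_neg h1, Int.toNat_natCast]
    rw [Nat.toDigits]
    rw [toDigitsCore_eq (k + 1) k [] (by omega) hk]
    simp
  have hpal : palChars (PySem.Int.toChars ((k : Nat) : Int)) = true ↔
      (Nat.digits 10 k).reverse = Nat.digits 10 k := by
    rw [palChars_iff_aux (PySem.Int.toChars ((k : Nat) : Int)).length _ le_rfl, hs,
      List.reverse_reverse]
    constructor
    · intro h
      exact mapDigitChar_inj _ _ (fun d hd => hds10 d (List.mem_reverse.mp hd)) hds10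
        (by rw [List.map_reverse, ← h])
    · intro h
      rw [← List.map_reverse, h]
  have hR : ((Nat.ofDigits 10 (Nat.digits 10 k).reverse : Nat) = k) ↔
      (Nat.digits 10 k).reverse = Nat.digits 10 k := by
    constructor
    · intro h
      refine ofDigits_inj10 _ _ (by simp) (fun d hd => hds10 d (List.mem_reverse.mp hd)) hds10 ?_
      rw [h, Nat.ofDigits_digits]
    · intro h
      rw [h, Nat.ofDigits_digits]
  have hlen : (PySem.Int.toChars ((k : Nat) : Int)).length = (Nat.digits 10 k).length := by
    rw [hs]; simp
  rw [solve, solve_alt]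
  simp only [solveLoopA_eq k 0 0, zero_mul, zero_add]
  rw [if_neg (by omega : ¬ ((k : Nat) : Int) < 0)]
  have hmod : PySem.Int.mod (((Nat.digits 10 k).length : Nat) : Int) 2 =
      (((Nat.digits 10 k).length % 2 : Nat) : Int) := by
    exact_mod_cast PySem.Int.mod_natCast (Nat.digits 10 k).length 2
  by_cases hp : (Nat.digits 10 k).reverse = Nat.digits 10 k
  · have h1 : ((Nat.ofDigits 10 (Nat.digits 10 k).reverse : Nat) : Int) = ((k : Nat) : Int) := by
      exact_mod_cast hR.mpr hp
    have h2 : palChars (PySem.Int.toChars ((k : Nat) : Int)) = true := hpal.mpr hp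
    simp only [h1, h2, hmod, hlen]
    by_cases he : (Nat.digits 10 k).length % 2 = 0
    · simp [he]
    · have hne : ¬ (((Nat.digits 10 k).length % 2 : Nat) : Int) = 0 := by exact_mod_cast he
      simp [he, hne]
      omega
  · have h1 : ¬ ((Nat.ofDigits 10 (Nat.digits 10 k).reverse : Nat) : Int) = ((k : Nat) : Int) := by
      intro h
      exact hp (hR.mp (by exact_mod_cast h))
    have h2 : palChars (PySem.Int.toChars ((k : Nat) : Int)) = false := by
      rcases Bool.eq_false_or_eq_true (palChars (PySem.Int.toChars ((k : Nat) : Int))) with h | h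
      · exact absurd (hpal.mp h) hp
      · exact h
    simp [h1, h2]

theorem solve_neg (n : Int) (hn : n < 0) : solve n = solve_alt n := by
  rw [solve, solve_alt]
  rw [solveLoopA]
  rw [dif_neg (by omega)]
  simp [hn]
  omega

theorem solve_at_zero : solve 0 = some true := by
  rw [solve, solveLoopA]
  norm_num

theorem solve_alt_at_zero : solve_alt 0 = none := by
  rw [solve_alt]
  have h : palChars (PySem.Int.toChars 0) = true := by
    rw [palChars]
    decide
  simp [h]
  decide

-- ===== VERDICT =====
theorem solve_spec : Claim_unchanged_solve := by
  intro n _ hD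
  rcases lt_trichotomy n 0 with h | h | h
  · exact solve_neg n h
  · exact absurd h hD
  · have hn : n = ((n.toNat : Nat) : Int) := by omega
    rw [hn]
    exact solve_eq_of_pos n.toNat (by omega)

theorem solve_changed : Claim_changed_solve := by
  unfold Claim_changed_solve
  refine ⟨by decide, by decide, solve_at_zero, solve_alt_at_zero, by decide⟩

theorem solve_tight : Claim_exact_solve := by
  intro n _ hD
  rw [hD, solve_at_zero, solve_alt_at_zero]
  simp
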